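-- pv_equiv track=rewrite | github.com/kase1111-hash/Lexicon | src/analysis/contact_detection.py | _cluster_by_time_period
-- ===== SOURCE A (Python) =====
-- from collections import defaultdict
--
-- def _cluster_by_time_period(
--
--     borrowings: list[dict],
-- ) -> dict[tuple[int, int], list[dict]]:
--     """Cluster borrowings by time period (century)."""
--     clusters: dict[tuple[int, int], list[dict]] = defaultdict(list)
--
--     for b in borrowings:
--         date = b.get("date")
--         if date is None:
--             continue
--
--         century_start = (date // 100) * 100
--         period = (century_start, century_start + 100)
--         clusters[period].append(b)
--
--     return clusters
-- ===== SOURCE B (Python) =====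
-- from collections import defaultdict
--
-- def _cluster_by_time_period(borrowings):
--     """Cluster borrowings by time period (century) — per-century filter passes."""
--     dated = [b for b in borrowings if b.get("date") is not None]
--     keys = []
--     for b in dated:
--         c = (b["date"] // 100) * 100
--         if c not in keys:
--             keys.append(c)
--     clusters = defaultdict(list)
--     for c in keys:
--         clusters[(c, c + 100)] = [b for b in dated if (b["date"] // 100) * 100 == c]
--     return clusters
-- ===== Notes on version B (the rewrite author's own statement) =====
-- stated objective: alternative
-- what changed: A builds the dict in one pass, appending each borrowing to its century bucket as it goes; B first collects the distinct century keys in first-occurrence order and then builds each bucket with a separate filter pass over the dated borrowings.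
import Mathlib
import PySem

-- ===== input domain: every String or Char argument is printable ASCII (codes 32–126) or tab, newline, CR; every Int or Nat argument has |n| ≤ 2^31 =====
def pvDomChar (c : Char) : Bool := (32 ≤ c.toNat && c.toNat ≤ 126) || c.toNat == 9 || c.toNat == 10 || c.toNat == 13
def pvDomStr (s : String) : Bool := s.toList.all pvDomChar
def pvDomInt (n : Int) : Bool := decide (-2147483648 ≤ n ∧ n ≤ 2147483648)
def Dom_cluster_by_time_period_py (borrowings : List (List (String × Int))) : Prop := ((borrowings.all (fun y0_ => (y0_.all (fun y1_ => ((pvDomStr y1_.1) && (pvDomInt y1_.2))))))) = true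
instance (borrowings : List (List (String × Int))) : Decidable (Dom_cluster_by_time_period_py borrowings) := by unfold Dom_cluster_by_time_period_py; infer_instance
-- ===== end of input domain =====

-- B replaces A's single-pass dict-append loop by: collect distinct century keys in
-- first-occurrence order, then build each bucket with a separate filter pass (objective: alternative).

-- ===== PORT A =====
-- A: one pass; clusters is a defaultdict(list); skip entries without a "date"; append b under (century_start, century_start+100).
def cluster_by_time_period_py (borrowings : List (List (String × Int))) : List (Int × Int × List (List (String × Int))) :=
  (borrowings.foldl
    (fun (clusters : PySem.Dict (Int × Int) (List (List (String × Int)))) b =>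
      match (PySem.Dict.mk b).get? "date" with
      | none => clusters
      | some date =>
        let century_start := PySem.Int.floordiv date 100 * 100
        clusters.modify (century_start, century_start + 100) [] (· ++ [b]))
    PySem.Dict.empty).items.map (fun p => (p.1.1, p.1.2, p.2))

-- ===== PORT B =====
-- B: filter to dated borrowings; dedup their centuries in first-occurrence order; one filter pass per key.
def cluster_by_time_period_py_alt (borrowings : List (List (String × Int))) : List (Int × Int × List (List (String × Int))) :=
  let dated := borrowings.filter (fun b => ((PySem.Dict.mk b).get? "date").isSome)
  let keys : PySem.Set Int := dated.foldl
    (fun ks b =>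
      match (PySem.Dict.mk b).get? "date" with
      | some d => PySem.Set.add ks (PySem.Int.floordiv d 100 * 100)
      | none => ks)  -- unreachable on dated (b["date"] is present)
    PySem.Set.empty
  keys.map (fun c => (c, c + 100,
    dated.filter (fun b =>
      match (PySem.Dict.mk b).get? "date" with
      | some d => PySem.Int.floordiv d 100 * 100 == c
      | none => false)))  -- unreachable on dated

-- ===== PRECONDITION & SPEC =====
def Spec_cluster_by_time_period_py (borrowings : List (List (String × Int))) (out : List (Int × Int × List (List (String × Int)))) : Prop := out = cluster_by_time_period_py_alt borrowings
instance (borrowings : List (List (String × Int))) (out : List (Int × Int × List (List (String × Int)))) : Decidable (Spec_cluster_by_time_period_py borrowings out) := by unfold Spec_cluster_by_time_period_py; infer_instance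

-- ===== CLAIM (what is proved, stated in full; the proofs are below) =====
def Claim_equal_cluster_by_time_period_py : Prop := ∀ (borrowings : List (List (String × Int))), Dom_cluster_by_time_period_py borrowings → Spec_cluster_by_time_period_py borrowings (cluster_by_time_period_py borrowings)

-- ===== LEMMAS AND PROOFS =====

-- century of a borrowing, if it has a date
def pvCent (b : List (String × Int)) : Option Int :=
  ((PySem.Dict.mk b).get? "date").map (fun d => PySem.Int.floordiv d 100 * 100)

-- the (period, borrowing) pairs A's loop actually inserts
def pvPairs (l : List (List (String × Int))) : List ((Int × Int) × List (String × Int)) :=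
  l.filterMap (fun b => (pvCent b).map (fun c => ((c, c + 100), b)))

theorem pvPairs_cons_none (b : List (String × Int)) (t : List (List (String × Int)))
    (h : (PySem.Dict.mk b).get? "date" = none) : pvPairs (b :: t) = pvPairs t := by
  simp [pvPairs, List.filterMap_cons, pvCent, h]

theorem pvPairs_cons_some (b : List (String × Int)) (t : List (List (String × Int))) (d : Int)
    (h : (PySem.Dict.mk b).get? "date" = some d) :
    pvPairs (b :: t) = ((PySem.Int.floordiv d 100 * 100, PySem.Int.floordiv d 100 * 100 + 100), b) :: pvPairs t := by
  simp [pvPairs, List.filterMap_cons, pvCent, h]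

theorem pvCentFM_cons_none (b : List (String × Int)) (t : List (List (String × Int)))
    (h : (PySem.Dict.mk b).get? "date" = none) :
    List.filterMap pvCent (b :: t) = List.filterMap pvCent t := by
  simp [List.filterMap_cons, pvCent, h]

theorem pvCentFM_cons_some (b : List (String × Int)) (t : List (List (String × Int))) (d : Int)
    (h : (PySem.Dict.mk b).get? "date" = some d) :
    List.filterMap pvCent (b :: t) = PySem.Int.floordiv d 100 * 100 :: List.filterMap pvCent t := by
  simp [List.filterMap_cons, pvCent, h]

theorem pvFoldA_eq_pairs (l : List (List (String × Int)))
    (d : PySem.Dict (Int × Int) (List (List (String × Int)))) :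
    l.foldl
      (fun clusters b =>
        match (PySem.Dict.mk b).get? "date" with
        | none => clusters
        | some date =>
          let cs := PySem.Int.floordiv date 100 * 100
          clusters.modify (cs, cs + 100) [] (· ++ [b])) d
    = (pvPairs l).foldl (fun d p => d.modify p.1 [] (· ++ [p.2])) d := by
  induction l generalizing d with
  | nil => rfl
  | cons b t ih =>
    simp only [List.foldl_cons]
    cases h : (PySem.Dict.mk b).get? "date" with
    | none =>
      rw [pvPairs_cons_none b t h]
      simpa only [h] using ih d
    | some date =>
      rw [pvPairs_cons_some b t date h]
      simp only [List.foldl_cons]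
      simpa only [h] using ih _

theorem pvOfList_map_inj {α β : Type} [BEq α] [LawfulBEq α] [BEq β] [LawfulBEq β]
    (g : α → β) (hg : Function.Injective g) (l : List α) :
    PySem.Set.ofList (l.map g) = (PySem.Set.ofList l).map g := by
  induction l using List.reverseRecOn with
  | nil => rfl
  | append_singleton t x ih =>
    rw [List.map_append, List.map_singleton, PySem.Set.ofList_append_singleton,
      PySem.Set.ofList_append_singleton, ih]
    by_cases hx : x ∈ PySem.Set.ofList t
    · rw [PySem.Set.add_of_mem hx, PySem.Set.add_of_mem (List.mem_map_of_mem hx)]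
    · rw [PySem.Set.add_of_not_mem hx, PySem.Set.add_of_not_mem
        (by simp only [List.mem_map]; rintro ⟨y, hy, hxy⟩; exact hx (hg hxy ▸ hy)),
        List.map_append, List.map_singleton]

theorem pvPairs_keys (l : List (List (String × Int))) :
    (pvPairs l).map (·.1) = (l.filterMap pvCent).map (fun c => (c, c + 100)) := by
  induction l with
  | nil => rfl
  | cons b t ih =>
    cases h : (PySem.Dict.mk b).get? "date" with
    | none => rw [pvPairs_cons_none b t h, pvCentFM_cons_none b t h]; exact ih
    | some d =>
      rw [pvPairs_cons_some b t d h, pvCentFM_cons_some b t d h, List.map_cons, List.map_cons, ih]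

theorem pvPairs_filter (l : List (List (String × Int))) (c : Int) :
    ((pvPairs l).filter (fun p => p.1 == (c, c + 100))).map (·.2)
      = l.filter (fun b => pvCent b == some c) := by
  induction l with
  | nil => rfl
  | cons b t ih =>
    cases h : (PySem.Dict.mk b).get? "date" with
    | none =>
      have hc : pvCent b = none := by simp [pvCent, h]
      rw [pvPairs_cons_none b t h, List.filter_cons]
      simp only [hc, ih]
      simp
    | some d =>
      have hfd : PySem.Int.floordiv d 100 = d / 100 := PySem.Int.floordiv_eq_ediv_of_pos (by norm_num)
      have hc : pvCent b = some (d / 100 * 100) := by simp [pvCent, h, hfd]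
      rw [pvPairs_cons_some b t d h, hfd, List.filter_cons, List.filter_cons, hc]
      by_cases hcc : d / 100 * 100 = c
      · simp [hcc, ih]
      · have h1 : (((d / 100 * 100 : Int), (d / 100 * 100 + 100 : Int)) == (c, c + 100)) = false := by
          simp [Prod.ext_iff]; omega
        simp [h1, hcc, ih]

theorem pvKeysB_aux (l : List (List (String × Int))) (s : PySem.Set Int) :
    (l.filter (fun b => ((PySem.Dict.mk b).get? "date").isSome)).foldl
      (fun ks b =>
        match (PySem.Dict.mk b).get? "date" with
        | some d => PySem.Set.add ks (PySem.Int.floordiv d 100 * 100)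
        | none => ks) s
    = PySem.Set.update s (l.filterMap pvCent) := by
  induction l generalizing s with
  | nil => rfl
  | cons b t ih =>
    simp only [List.filter_cons]
    cases h : (PySem.Dict.mk b).get? "date" with
    | none =>
      rw [pvCentFM_cons_none b t h]
      simpa only [h, Option.isSome_none, Bool.false_eq_true, if_false] using ih s
    | some d =>
      rw [pvCentFM_cons_some b t d h, PySem.Set.update_cons]
      simp only [h, Option.isSome_some, if_true, List.foldl_cons]
      simpa only [h] using ih _

theorem pvKeysB (l : List (List (String × Int))) :
    (l.filter (fun b => ((PySem.Dict.mk b).get? "date").isSome)).foldl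
      (fun ks b =>
        match (PySem.Dict.mk b).get? "date" with
        | some d => PySem.Set.add ks (PySem.Int.floordiv d 100 * 100)
        | none => ks) PySem.Set.empty
    = PySem.Set.ofList (l.filterMap pvCent) := by
  have h := pvKeysB_aux l PySem.Set.empty
  simpa [PySem.Set.update_nil_left] using h

-- B's per-key filter over the dated list equals the filter over all of l
theorem pvFilterB (l : List (List (String × Int))) (c : Int) :
    (l.filter (fun b => ((PySem.Dict.mk b).get? "date").isSome)).filter
      (fun b =>
        match (PySem.Dict.mk b).get? "date" with
        | some d => PySem.Int.floordiv d 100 * 100 == c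
        | none => false)
    = l.filter (fun b => pvCent b == some c) := by
  rw [List.filter_filter]
  apply List.filter_congr
  intro b _
  cases h : (PySem.Dict.mk b).get? "date" <;> simp [pvCent, h]

theorem cluster_py_spec_aux (l : List (List (String × Int))) :
    cluster_by_time_period_py l = cluster_by_time_period_py_alt l := by
  have hg : Function.Injective (fun c : Int => (c, c + 100)) := by
    intro a b h; simpa [Prod.ext_iff] using h
  have hnd : ((pvPairs l).foldl (fun d p => d.modify p.1 [] (· ++ [p.2]))
      (PySem.Dict.empty : PySem.Dict (Int × Int) (List (List (String × Int))))).keys.Nodup := by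
    exact PySem.Dict.nodup_keys_foldl_modify_key _ _ _ _ _ (by simp)
  unfold cluster_by_time_period_py
  simp only [cluster_by_time_period_py_alt]
  rw [pvFoldA_eq_pairs, pvKeysB,
    PySem.Dict.items_eq_map_keys _ hnd ([] : List (List (String × Int))),
    PySem.Dict.keys_foldl_modify_key]
  simp only [PySem.Dict.keys_empty, PySem.Set.update_nil_left]
  rw [pvPairs_keys, pvOfList_map_inj _ hg, List.map_map, List.map_map]
  apply List.map_congr_left
  intro c _
  simp only [Function.comp, Function.comp_apply]
  rw [PySem.Dict.getD_foldl_modify_append, pvPairs_filter, pvFilterB,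
    PySem.Dict.getD_empty, List.nil_append]

-- ===== VERDICT (by name: the statement is the Claim_ definition above) =====
theorem cluster_by_time_period_py_spec : Claim_equal_cluster_by_time_period_py := by
  intro l _
  unfold Spec_cluster_by_time_period_py
  exact cluster_py_spec_aux l
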